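-- pv_equiv track=rewrite | github.com/mukai1011/xddb | src/xddb/lcg.py | _calc_index
-- ===== SOURCE A (Python) =====
-- _mask = 0xFFFF_FFFF
--
-- def _calc_index(seed: int, a: int, b: int, order: int) -> int:
--     if order == 0:
--         return 0
--
--     if (seed & 1) == 0:
--         a, b = (a * a) & _mask, (((a + 1) * b) & _mask) // 2
--         return _calc_index(seed // 2, a, b, order - 1) * 2
--     else:
--         seed = (a * seed + b) & _mask
--         a, b = (a * a) & _mask, (((a + 1) * b) & _mask) // 2
--         return _calc_index(seed // 2, a, b, order - 1) * 2 - 1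
-- ===== SOURCE B (Python) =====
-- _mask = 0xFFFF_FFFF
--
-- def _calc_index(seed: int, a: int, b: int, order: int) -> int:
--     result = 0
--     for i in range(order):
--         c = seed & 1
--         if c:
--             seed = (a * seed + b) & _mask
--         a, b = (a * a) & _mask, (((a + 1) * b) & _mask) // 2
--         seed //= 2
--         result -= c << i
--     return result
-- ===== Notes on version B (the rewrite author's own statement) =====
-- stated objective: alternative
-- what changed: Replaces the bit-by-bit recursion (which rebuilds the result with trailing *2/-1 on the way back up) by a single forward loop that keeps (seed,a,b) as mutable state and directly accumulates the negated bit weighted by 2^i.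
import Mathlib
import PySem

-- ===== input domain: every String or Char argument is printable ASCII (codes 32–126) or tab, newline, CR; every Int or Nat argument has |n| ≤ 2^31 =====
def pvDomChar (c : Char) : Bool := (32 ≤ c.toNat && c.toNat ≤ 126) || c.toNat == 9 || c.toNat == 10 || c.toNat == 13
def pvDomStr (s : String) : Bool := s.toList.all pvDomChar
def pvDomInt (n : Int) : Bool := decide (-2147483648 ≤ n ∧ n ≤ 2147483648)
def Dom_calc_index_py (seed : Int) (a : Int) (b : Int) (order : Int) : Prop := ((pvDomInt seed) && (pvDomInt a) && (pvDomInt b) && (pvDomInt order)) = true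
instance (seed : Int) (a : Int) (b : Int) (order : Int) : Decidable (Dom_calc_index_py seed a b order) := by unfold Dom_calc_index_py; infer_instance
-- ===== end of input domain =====

-- B replaces A's bit-by-bit recursion by a forward loop accumulating the negated bit weighted by 2^i (alternative decomposition, same cost; return value only).

-- ===== PORT A =====
-- A recurses on `order`; ported with a Nat fuel equal to order.toNat (exact for order ≥ 0, which Pre_ states).
-- `x & 0xFFFF_FFFF` on Python ints equals x mod 2^32 for every int → PySem.Int.mod x 4294967296 (exact).
def calcAuxA : Nat → Int → Int → Int → Int
  | 0, _, _, _ => 0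
  | n+1, seed, a, b =>
    if PySem.Int.mod seed 2 == 0 then
      let a' := PySem.Int.mod (a * a) 4294967296
      let b' := PySem.Int.floordiv (PySem.Int.mod ((a + 1) * b) 4294967296) 2
      calcAuxA n (PySem.Int.floordiv seed 2) a' b' * 2
    else
      let s' := PySem.Int.mod (a * seed + b) 4294967296
      let a' := PySem.Int.mod (a * a) 4294967296
      let b' := PySem.Int.floordiv (PySem.Int.mod ((a + 1) * b) 4294967296) 2
      calcAuxA n (PySem.Int.floordiv s' 2) a' b' * 2 - 1

def calc_index_py (seed : Int) (a : Int) (b : Int) (order : Int) : Int :=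
  calcAuxA order.toNat seed a b

-- ===== PORT B =====
-- loop body: state (seed, a, b, result); `c << i` with c ∈ {0,1} is c * 2^i (i ≥ 0 inside range(order)).
def stepB (st : Int × Int × Int × Int) (i : Int) : Int × Int × Int × Int :=
  let s := st.1; let a := st.2.1; let b := st.2.2.1; let r := st.2.2.2
  let c := PySem.Int.mod s 2
  let s1 := if c != 0 then PySem.Int.mod (a * s + b) 4294967296 else s
  let a' := PySem.Int.mod (a * a) 4294967296
  let b' := PySem.Int.floordiv (PySem.Int.mod ((a + 1) * b) 4294967296) 2
  (PySem.Int.floordiv s1 2, a', b', r - c * 2 ^ i.toNat)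

def calc_index_py_alt (seed : Int) (a : Int) (b : Int) (order : Int) : Int :=
  ((PySem.List.pyRange 0 order 1).foldl stepB (seed, a, b, 0)).2.2.2

-- ===== PRECONDITION & SPEC =====
-- Pre_ excludes order < 0, on which A recurses without a base case and raises RecursionError.
def Pre_calc_index_py (seed : Int) (a : Int) (b : Int) (order : Int) : Prop := 0 ≤ order
instance (seed : Int) (a : Int) (b : Int) (order : Int) : Decidable (Pre_calc_index_py seed a b order) := by unfold Pre_calc_index_py; infer_instance
def pvWitness_calc_index_py : Int × Int × Int × Int := (3, 5, 7, 4)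

def Spec_calc_index_py (seed : Int) (a : Int) (b : Int) (order : Int) (out : Int) : Prop := out = calc_index_py_alt seed a b order
instance (seed : Int) (a : Int) (b : Int) (order : Int) (out : Int) : Decidable (Spec_calc_index_py seed a b order out) := by unfold Spec_calc_index_py; infer_instance

-- ===== CLAIM (what is proved, stated in full; the proofs are below) =====
def Claim_equal_calc_index_py : Prop := ∀ (seed : Int) (a : Int) (b : Int) (order : Int), Dom_calc_index_py seed a b order → Pre_calc_index_py seed a b order → Spec_calc_index_py seed a b order (calc_index_py seed a b order)

-- ===== LEMMAS AND PROOFS =====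

-- The fold over range(k, k+m) starting from accumulator r contributes 2^k times A's recursive value.
theorem foldB_eq (m : Nat) : ∀ (k s a b r : Int), 0 ≤ k →
    ((PySem.List.pyRange k (k + (m : Int)) 1).foldl stepB (s, a, b, r)).2.2.2
      = r + 2 ^ k.toNat * calcAuxA m s a b := by
  induction m with
  | zero =>
    intro k s a b r _
    rw [PySem.List.pyRange_one_eq_nil (by omega)]
    simp [calcAuxA]
  | succ n ih =>
    intro k s a b r hk
    rw [PySem.List.pyRange_one_cons (by push_cast; omega)]
    have hrange : k + ((n : Int) + 1) = (k + 1) + (n : Int) := by ring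
    have htn : (k + 1).toNat = k.toNat + 1 := by omega
    rcases PySem.Int.mod_two_eq s with hm | hm
    · -- even step
      have hdvd : (2 : Int) ∣ s := (PySem.Int.mod_eq_zero_iff_dvd s 2).mp hm
      simp only [List.foldl_cons, stepB, hm]
      push_cast
      rw [hrange, ih (k + 1) _ _ _ _ (by omega)]
      simp [calcAuxA, hdvd, htn]
      ring
    · -- odd step
      have hnd : ¬ (2 : Int) ∣ s := by
        intro h
        rw [← PySem.Int.mod_eq_zero_iff_dvd] at h
        omega
      simp only [List.foldl_cons, stepB, hm]
      push_cast
      rw [hrange, ih (k + 1) _ _ _ _ (by omega)]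
      simp [calcAuxA, hnd, htn]
      ring

-- ===== VERDICT (by name: the statement is the Claim_ definition above) =====
theorem calc_index_py_spec : Claim_equal_calc_index_py := by
  intro seed a b order _ hpre
  unfold Spec_calc_index_py calc_index_py calc_index_py_alt
  unfold Pre_calc_index_py at hpre
  have h0 : (0 : Int) + (order.toNat : Int) = order := by omega
  have := foldB_eq order.toNat 0 seed a b 0 le_rfl
  rw [h0] at this
  simp [this]
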